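-- pv_equiv track=rewrite | github.com/ken1882/MyselfAnimeDownloader | myself_tools.py | badname
-- ===== SOURCE A (Python) =====
-- def badname(name):
--     ban = r'\/:*?"<>|.'
--     """
--     避免不正當名字出現導致資料夾或檔案無法創建。
--     """
--     for i in ban:
--         name = str(name).replace(i, ' ')
--     return name.strip()
-- ===== SOURCE B (Python) =====
-- def badname(name):
--     ban = set(r'\/:*?"<>|.')
--     return ''.join(' ' if c in ban else c for c in str(name)).strip()
-- ===== Notes on version B (the rewrite author's own statement) =====
-- stated objective: idiomatic
-- what changed: B makes one pass over the characters of str(name), emitting a space for characters found in a ban set, instead of A's ten whole-string str.replace passes (one per banned character).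
import Mathlib
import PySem

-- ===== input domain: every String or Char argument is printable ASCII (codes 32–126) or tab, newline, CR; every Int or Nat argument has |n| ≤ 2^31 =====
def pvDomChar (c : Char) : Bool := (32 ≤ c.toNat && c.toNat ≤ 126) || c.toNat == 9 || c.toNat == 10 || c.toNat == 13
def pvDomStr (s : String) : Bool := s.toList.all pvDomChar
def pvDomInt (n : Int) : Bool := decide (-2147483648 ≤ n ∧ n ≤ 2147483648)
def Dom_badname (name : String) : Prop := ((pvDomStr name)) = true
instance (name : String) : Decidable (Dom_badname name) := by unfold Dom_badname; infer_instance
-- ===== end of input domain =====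

-- B makes one pass over the characters, spacing out banned ones, instead of A's ten str.replace passes.

-- ===== PORT A =====
def badname (name : String) : String :=
  let ban : String := "\\/:*?\"<>|."
  let name := ban.toList.foldl (fun n i => PySem.Str.replace n (String.ofList [i]) " ") name
  PySem.Str.strip name

-- ===== PORT B =====
def badname_alt (name : String) : String :=
  let ban : PySem.Set Char := PySem.Set.ofList "\\/:*?\"<>|.".toList
  PySem.Str.strip (String.ofList (name.toList.map (fun c => if ban.contains c then ' ' else c)))

-- ===== PRECONDITION & SPEC =====
def Spec_badname (name : String) (out : String) : Prop := out = badname_alt name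
instance (name : String) (out : String) : Decidable (Spec_badname name out) := by unfold Spec_badname; infer_instance

-- ===== CLAIM (what is proved, stated in full; the proofs are below) =====
def Claim_equal_badname : Prop := ∀ (name : String), Dom_badname name → Spec_badname name (badname name)

-- ===== LEMMAS AND PROOFS =====

-- replace.go with a single-char pattern is a character map
theorem go_single (c b : Char) : ∀ (s : List Char) (fuel : Nat) (acc : List Char),
    s.length ≤ fuel →
    PySem.Chars.replace.go [c] [b] fuel s acc
      = acc.reverse ++ s.map (fun x => if x = c then b else x) := by
  intro s
  induction s with
  | nil =>
    intro fuel acc _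
    cases fuel <;> simp [PySem.Chars.replace.go]
  | cons x t ih =>
    intro fuel acc h
    cases fuel with
    | zero => simp at h
    | succ n =>
      by_cases hx : x = c
      · subst hx
        simp only [PySem.Chars.replace.go, List.isPrefixOf, BEq.rfl, Bool.true_and, if_true]
        rw [show List.drop [x].length (x :: t) = t from rfl,
          ih n ([b].reverse ++ acc) (by simpa using h)]
        simp
      · have hbeq : (c == x) = false := by simp [Ne.symm hx]
        simp only [PySem.Chars.replace.go, List.isPrefixOf, hbeq, Bool.false_and, if_neg,
          Bool.false_eq_true, not_false_iff]
        rw [ih n (x :: acc) (by simpa using h)]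
        simp [hx]

theorem replace_single (s : List Char) (c b : Char) :
    PySem.Chars.replace s [c] [b] = s.map (fun x => if x = c then b else x) := by
  rw [PySem.Chars.replace]
  simp [go_single c b s s.length [] (le_refl _)]

-- A's whole loop, expressed on character lists
theorem toList_foldl_replace : ∀ (l : List Char) (n : String),
    (l.foldl (fun n i => PySem.Str.replace n (String.ofList [i]) " ") n).toList
      = l.foldl (fun t i => t.map (fun x => if x = i then ' ' else x)) n.toList := by
  intro l
  induction l with
  | nil => intro n; rfl
  | cons i t ih =>
    intro n
    simp only [List.foldl_cons]
    rw [ih]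
    congr 1
    rw [PySem.Str.toList_replace, show (String.ofList [i]).toList = [i] from
        Eq.symm ((fun {l} {s} => String.ofList_eq.mp) rfl),
      show (" " : String).toList = [' '] from rfl]
    exact replace_single n.toList i ' '

-- a sequence of char maps is one map of the folded substitution
theorem foldl_map_fusion : ∀ (l : List Char) (s : List Char),
    l.foldl (fun (t : List Char) i => t.map (fun x => if x = i then ' ' else x)) s
      = s.map (fun x => l.foldl (fun y i => if y = i then ' ' else y) x) := by
  intro l
  induction l with
  | nil => intro s; simp
  | cons i t ih =>
    intro s
    simp only [List.foldl_cons]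
    rw [ih, List.map_map]
    rfl

-- folding the substitutions over a space-free ban list is a membership test
theorem chain_eq_mem : ∀ (l : List Char), ' ' ∉ l → ∀ (x : Char),
    l.foldl (fun y i => if y = i then ' ' else y) x = if x ∈ l then ' ' else x := by
  intro l
  induction l with
  | nil => intro _ x; simp
  | cons i t ih =>
    intro h x
    have ht : ' ' ∉ t := fun hm => h (List.mem_cons_of_mem _ hm)
    by_cases hx : x = i
    · subst hx
      simp [ih ht]
    · simp only [List.foldl_cons, if_neg hx]
      rw [ih ht x]
      simp [hx]

theorem badname_eq (name : String) : badname name = badname_alt name := by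
  unfold badname badname_alt
  apply congrArg PySem.Str.strip
  apply String.toList_inj.mp
  rw [show (String.ofList (name.toList.map (fun c => if (PySem.Set.ofList "\\/:*?\"<>|.".toList).contains c then ' ' else c))).toList
      = name.toList.map (fun c => if (PySem.Set.ofList "\\/:*?\"<>|.".toList).contains c then ' ' else c) from
      Eq.symm ((fun {l} {s} => String.ofList_eq.mp) rfl)]
  have h1 := toList_foldl_replace ("\\/:*?\"<>|.".toList) name
  have h2 := foldl_map_fusion ("\\/:*?\"<>|.".toList) name.toList
  have hsp : ' ' ∉ "\\/:*?\"<>|.".toList := by decide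
  calc (("\\/:*?\"<>|.".toList.foldl (fun n i => PySem.Str.replace n (String.ofList [i]) " ") name)).toList
      = name.toList.map (fun x => ("\\/:*?\"<>|.".toList).foldl (fun y i => if y = i then ' ' else y) x) := by rw [h1, h2]
    _ = name.toList.map (fun c => if (PySem.Set.ofList "\\/:*?\"<>|.".toList).contains c then ' ' else c) := by
        apply List.map_congr_left
        intro c _
        rw [chain_eq_mem _ hsp c]
        have hmem : (PySem.Set.ofList "\\/:*?\"<>|.".toList).contains c = true
            ↔ c ∈ "\\/:*?\"<>|.".toList := by
          rw [PySem.Set.contains_iff]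
          exact PySem.Set.mem_ofList _ _
        by_cases hc : c ∈ "\\/:*?\"<>|.".toList
        · rw [if_pos hc, if_pos (hmem.mpr hc)]
        · rw [if_neg hc, if_neg (fun h => hc (hmem.mp h))]

-- ===== VERDICT (by name: the statement is the Claim_ definition above) =====
theorem badname_spec : Claim_equal_badname := by
  intro name _
  unfold Spec_badname
  exact badname_eq name
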